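-- pv_equiv track=rewrite | github.com/jilek-josef/FluxMod-Bot | cogs/automod.py | _normalize_pattern_list
-- ===== SOURCE A (Python) =====
-- def _normalize_pattern_list(raw_patterns):
--     normalized = []
--     for pattern in raw_patterns:
--         if not isinstance(pattern, str):
--             continue
--
--         # Some preset entries are accidentally saved as "a, b" in one slot.
--         for part in pattern.split(","):
--             clean = part.strip().lower()
--             if clean:
--                 normalized.append(clean)
--
--     return normalized
-- ===== SOURCE B (Python) =====
-- def _normalize_pattern_list(raw_patterns):
--     # Character-level state machine: one scan per pattern (with a virtual
--     # trailing comma), building the lowercased, trimmed token incrementally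
--     # instead of calling split/strip/lower.
--     out = []
--     for pattern in raw_patterns:
--         if not isinstance(pattern, str):
--             continue
--         token = []    # lowercased chars of the current token so far
--         pending = []  # interior whitespace, flushed only if a non-space follows
--         for ch in pattern + ",":
--             if ch == ",":
--                 if token:
--                     out.append("".join(token))
--                 token = []
--                 pending = []
--             elif ch.isspace():
--                 if token:
--                     pending.append(ch)
--             else:
--                 token += pending
--                 pending = []
--                 token.append(ch.lower())
--     return out
-- ===== Notes on version B (the rewrite author's own statement) =====
-- stated objective: alternative
-- what changed: A splits each pattern on commas and then strip()s and lower()s each part; B never calls split/strip/lower: it runs a character-level state machine over each pattern (plus a virtual trailing comma), accumulating the lowercased token and buffering interior whitespace that is flushed only when a further non-space character arrives, emitting the token at each comma.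
import Mathlib
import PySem

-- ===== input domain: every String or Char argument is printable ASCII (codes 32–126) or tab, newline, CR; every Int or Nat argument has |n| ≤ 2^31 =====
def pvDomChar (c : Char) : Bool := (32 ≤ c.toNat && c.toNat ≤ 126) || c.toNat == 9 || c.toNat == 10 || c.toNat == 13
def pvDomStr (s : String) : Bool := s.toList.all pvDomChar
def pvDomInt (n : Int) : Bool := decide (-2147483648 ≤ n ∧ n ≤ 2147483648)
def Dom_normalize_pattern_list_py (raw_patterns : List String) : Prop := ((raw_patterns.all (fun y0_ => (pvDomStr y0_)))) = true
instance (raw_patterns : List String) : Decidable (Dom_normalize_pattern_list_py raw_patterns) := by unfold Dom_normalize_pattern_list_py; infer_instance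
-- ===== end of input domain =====

-- B replaces A's split/strip/lower per comma-part with a character-level state machine
-- (one scan per pattern, emitting tokens at commas); same result, alternative algorithm.

-- ===== PORT A =====
-- Port of A: outer loop over patterns, inner loop over pattern.split(","),
-- appending strip().lower() of each non-empty part. (The 'isinstance(pattern, str)'
-- guard is always true under the List String signature, so it never skips.)
def normalize_pattern_list_py (raw_patterns : List String) : List String :=
  raw_patterns.foldl (fun normalized pattern =>
    (PySem.Chars.splitOn pattern.toList [',']).foldl (fun acc part =>
      let clean := PySem.Chars.lower (PySem.Chars.strip part)
      if clean ≠ [] then acc ++ [String.ofList clean] else acc) normalized) []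

-- ===== PORT B =====
-- One step of Source B's inner character loop; state = (out, token, pending).
def pvScanStep (st : List String × List Char × List Char) (ch : Char) :
    List String × List Char × List Char :=
  if ch = ',' then
    ((if st.2.1 ≠ [] then st.1 ++ [String.ofList st.2.1] else st.1), [], [])
  else if PySem.Chars.isspace ch then
    (st.1, st.2.1, if st.2.1 ≠ [] then st.2.2 ++ [ch] else st.2.2)
  else
    (st.1, st.2.1 ++ st.2.2 ++ [PySem.Chars.lowerChar ch], [])

-- Port of B: for each pattern, scan pattern + "," char by char with pvScanStep.
def normalize_pattern_list_py_alt (raw_patterns : List String) : List String :=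
  raw_patterns.foldl (fun out pattern =>
    ((pattern.toList ++ [',']).foldl pvScanStep (out, [], [])).1) []

-- ===== PRECONDITION & SPEC =====
def Spec_normalize_pattern_list_py (raw_patterns : List String) (out : List String) : Prop := out = normalize_pattern_list_py_alt raw_patterns
instance (raw_patterns : List String) (out : List String) : Decidable (Spec_normalize_pattern_list_py raw_patterns out) := by unfold Spec_normalize_pattern_list_py; infer_instance

-- ===== CLAIM (what is proved, stated in full; the proofs are below) =====
def Claim_equal_normalize_pattern_list_py : Prop := ∀ (raw_patterns : List String), Dom_normalize_pattern_list_py raw_patterns → Spec_normalize_pattern_list_py raw_patterns (normalize_pattern_list_py raw_patterns)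

-- ===== LEMMAS AND PROOFS =====

-- Reference splitter: Python's s.split(c) for a single-char separator, as plain structural recursion.
def pvPieces (c : Char) : List Char → List (List Char)
  | [] => [[]]
  | ch :: rest => if ch = c then [] :: pvPieces c rest else (pvPieces c rest).modifyHead (ch :: ·)

def pvClean (part : List Char) : List Char := PySem.Chars.lower (PySem.Chars.strip part)

def pvMaybe (t : List Char) : List String := if t = [] then [] else [String.ofList t]

def pvProcess (ps : List (List Char)) : List String := ps.flatMap (fun p => pvMaybe (pvClean p))

def pvHasTok (p : List Char) : Bool := p.any (fun c => !PySem.Chars.isspace c)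

-- the token Source B's scanner holds after consuming the rest p of the current comma-part,
-- starting from token tok and pending-whitespace pend
def pvF (tok pend p : List Char) : List Char :=
  if tok = [] then pvClean p
  else tok ++ (if pvHasTok p then pend ++ PySem.Chars.lower (PySem.Chars.rstrip p) else [])

lemma pvPieces_ne_nil (c : Char) (l : List Char) : pvPieces c l ≠ [] := by
  induction l with
  | nil => simp [pvPieces]
  | cons ch rest ih =>
    simp only [pvPieces]
    split
    · simp
    · cases h : pvPieces c rest with
      | nil => exact absurd h ih
      | cons a t => simp [List.modifyHead]

lemma pvGo (c : Char) : ∀ (fuel : Nat) (l cur acc : _), l.length < fuel →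
    PySem.Chars.splitOn.go [c] fuel l cur acc
      = acc.reverse ++ (pvPieces c l).modifyHead (cur.reverse ++ ·) := by
  intro fuel
  induction fuel with
  | zero => intro l cur acc h; omega
  | succ fuel ih =>
    intro l cur acc h
    cases l with
    | nil => simp [PySem.Chars.splitOn.go, pvPieces]
    | cons ch rest =>
      by_cases hc : c = ch
      · subst hc
        rw [show PySem.Chars.splitOn.go [c] (fuel+1) (c :: rest) cur acc
              = PySem.Chars.splitOn.go [c] fuel rest [] (cur.reverse :: acc) from by
            simp [PySem.Chars.splitOn.go, List.isPrefixOf]]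
        rw [ih rest [] (cur.reverse :: acc) (by simpa using Nat.lt_of_succ_lt_succ h)]
        cases hp : pvPieces c rest with
        | nil => exact absurd hp (pvPieces_ne_nil c rest)
        | cons p t => simp [pvPieces, hp, List.modifyHead]
      · rw [show PySem.Chars.splitOn.go [c] (fuel+1) (ch :: rest) cur acc
              = PySem.Chars.splitOn.go [c] fuel rest (ch :: cur) acc from by
            simp [PySem.Chars.splitOn.go, List.isPrefixOf, hc]]
        rw [ih rest (ch :: cur) acc (by simpa using Nat.lt_of_succ_lt_succ h)]
        have hne : ¬ ch = c := fun h => hc h.symm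
        cases hp : pvPieces c rest with
        | nil => exact absurd hp (pvPieces_ne_nil c rest)
        | cons p t => simp [pvPieces, hp, hne, List.modifyHead]

lemma pvSplitOn_single (c : Char) (cs : List Char) :
    PySem.Chars.splitOn cs [c] = pvPieces c cs := by
  unfold PySem.Chars.splitOn
  rw [pvGo c (cs.length + 1) cs [] [] (by omega)]
  cases h : pvPieces c cs with
  | nil => exact absurd h (pvPieces_ne_nil c cs)
  | cons p t => simp [List.modifyHead]

-- character facts
lemma pvWs_lowerChar {c : Char} (h : PySem.Chars.isspace c = true) :
    PySem.Chars.lowerChar c = c := by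
  unfold PySem.Chars.lowerChar
  split
  · rename_i hu
    exfalso
    simp only [PySem.Chars.isupper, Bool.and_eq_true, decide_eq_true_eq, Char.le_def,
      UInt32.le_iff_toNat_le, show 'A'.val.toNat = 65 from rfl,
      show 'Z'.val.toNat = 90 from rfl] at hu
    simp only [PySem.Chars.isspace, Char.toNat, Bool.or_eq_true, Bool.and_eq_true,
      decide_eq_true_eq] at h
    omega
  · rfl

lemma pvLower_cons (c : Char) (l : List Char) :
    PySem.Chars.lower (c :: l) = PySem.Chars.lowerChar c :: PySem.Chars.lower l := by
  simp [PySem.Chars.lower]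

lemma pvHasTok_cons (c : Char) (p : List Char) :
    pvHasTok (c :: p) = (!PySem.Chars.isspace c || pvHasTok p) := by
  simp [pvHasTok]

lemma pvStrip_cons_ws {c : Char} (h : PySem.Chars.isspace c = true) (p : List Char) :
    PySem.Chars.strip (c :: p) = PySem.Chars.strip p := by
  simp [PySem.Chars.strip, PySem.Chars.lstrip, List.dropWhile, h]

lemma pvRev_dropWhile_ne_nil {p : List Char} (h : pvHasTok p = true) :
    List.dropWhile PySem.Chars.isspace p.reverse ≠ [] := by
  intro hnil
  rw [List.dropWhile_eq_nil_iff] at hnil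
  simp only [pvHasTok, List.any_eq_true, Bool.not_eq_true'] at h
  obtain ⟨x, hx, hxs⟩ := h
  have := hnil x (List.mem_reverse.mpr hx)
  rw [this] at hxs
  exact absurd hxs (by simp)

lemma pvRev_dropWhile_eq_nil {p : List Char} (h : pvHasTok p = false) :
    List.dropWhile PySem.Chars.isspace p.reverse = [] := by
  rw [List.dropWhile_eq_nil_iff]
  intro x hx
  simp only [pvHasTok, List.any_eq_false] at h
  have := h x (List.mem_reverse.mp hx)
  simpa using this

lemma pvRstrip_cons_hasTok {p : List Char} (h : pvHasTok p = true) (c : Char) :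
    PySem.Chars.rstrip (c :: p) = c :: PySem.Chars.rstrip p := by
  unfold PySem.Chars.rstrip
  rw [List.reverse_cons, List.dropWhile_append]
  rw [if_neg (by simpa using pvRev_dropWhile_ne_nil h)]
  simp

lemma pvRstrip_cons_allws {p : List Char} (h : pvHasTok p = false) {c : Char}
    (hc : PySem.Chars.isspace c = false) :
    PySem.Chars.rstrip (c :: p) = [c] := by
  unfold PySem.Chars.rstrip
  rw [List.reverse_cons, List.dropWhile_append]
  rw [if_pos (by simp [pvRev_dropWhile_eq_nil h])]
  simp [List.dropWhile, hc]

lemma pvStrip_cons_nonws {c : Char} (hc : PySem.Chars.isspace c = false) (p : List Char) :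
    PySem.Chars.strip (c :: p) = PySem.Chars.rstrip (c :: p) := by
  simp [PySem.Chars.strip, PySem.Chars.lstrip, List.dropWhile, hc]

lemma pvClean_nil : pvClean [] = [] := by
  simp [pvClean, PySem.Chars.strip, PySem.Chars.lstrip, PySem.Chars.rstrip, PySem.Chars.lower]

-- the scanner over l ++ "," : out picks up exactly the cleaned non-empty comma-parts of l
lemma pvH (l : List Char) : ∀ (out : List String) (tok pend : List Char), (tok = [] → pend = []) →
    ((l ++ [',']).foldl pvScanStep (out, tok, pend)).1
      = out ++ pvMaybe (pvF tok pend (pvPieces ',' l).headI) ++ pvProcess (pvPieces ',' l).tail := by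
  induction l with
  | nil =>
    intro out tok pend hinv
    by_cases ht : tok = []
    · simp [pvScanStep, pvPieces, pvF, pvClean_nil, pvMaybe, pvProcess, ht]
    · simp [pvScanStep, pvPieces, pvF, pvMaybe, pvProcess, ht, pvHasTok]
  | cons c r ih =>
    intro out tok pend hinv
    by_cases hc : c = ','
    · subst hc
      rw [List.cons_append, List.foldl_cons]
      have hstep : pvScanStep (out, tok, pend) ',' = (out ++ pvMaybe tok, [], []) := by
        by_cases ht : tok = [] <;> simp [pvScanStep, pvMaybe, ht]
      rw [hstep, ih (out ++ pvMaybe tok) [] [] (fun _ => rfl)]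
      have hp : pvPieces ',' (','::r) = [] :: pvPieces ',' r := by simp [pvPieces]
      rw [hp]
      cases hq : pvPieces ',' r with
      | nil => exact absurd hq (pvPieces_ne_nil ',' r)
      | cons p t =>
        by_cases ht : tok = [] <;>
          simp [pvF, pvProcess, pvMaybe, pvClean_nil, pvHasTok, ht]
    · rw [List.cons_append, List.foldl_cons]
      have hp : pvPieces ',' (c::r) = (pvPieces ',' r).modifyHead (c :: ·) := by
        simp [pvPieces, hc]
      cases hq : pvPieces ',' r with
      | nil => exact absurd hq (pvPieces_ne_nil ',' r)
      | cons p t =>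
        rw [hp, hq]
        by_cases hw : PySem.Chars.isspace c = true
        · by_cases ht : tok = []
          · have hpend : pend = [] := hinv ht
            subst ht; subst hpend
            have hstep : pvScanStep (out, ([]:List Char), ([]:List Char)) c = (out, [], []) := by
              simp [pvScanStep, hc, hw]
            rw [hstep, ih out [] [] (fun _ => rfl), hq]
            have : pvF [] [] (c::p) = pvF [] [] p := by
              simp [pvF, pvClean, pvStrip_cons_ws hw]
            simp [this, List.modifyHead]
          · have hstep : pvScanStep (out, tok, pend) c = (out, tok, pend ++ [c]) := by
              simp [pvScanStep, hc, hw, ht]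
            rw [hstep, ih out tok (pend ++ [c]) (fun h => absurd h ht), hq]
            have key : pvF tok pend (c::p) = pvF tok (pend ++ [c]) p := by
              by_cases hh : pvHasTok p = true
              · simp [pvF, ht, pvHasTok_cons, hw, hh, pvRstrip_cons_hasTok hh,
                  pvLower_cons, pvWs_lowerChar hw]
              · have hh' : pvHasTok p = false := by simpa using hh
                simp [pvF, ht, pvHasTok_cons, hw, hh']
            simp [key, List.modifyHead]
        · have hwf : PySem.Chars.isspace c = false := by simpa using hw
          have hstep : pvScanStep (out, tok, pend) c
              = (out, tok ++ pend ++ [PySem.Chars.lowerChar c], []) := by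
            simp [pvScanStep, hc, hwf]
          rw [hstep, ih out (tok ++ pend ++ [PySem.Chars.lowerChar c]) []
                (fun _ => rfl), hq]
          have key : pvF tok pend (c::p)
              = pvF (tok ++ pend ++ [PySem.Chars.lowerChar c]) [] p := by
            by_cases ht : tok = []
            · have hpend : pend = [] := hinv ht
              subst ht; subst hpend
              by_cases hh : pvHasTok p = true
              · simp [pvF, pvClean, pvStrip_cons_nonws hwf, pvRstrip_cons_hasTok hh,
                  pvLower_cons, hh]
              · have hh' : pvHasTok p = false := by simpa using hh
                simp [pvF, pvClean, pvStrip_cons_nonws hwf, pvRstrip_cons_allws hh' hwf,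
                  hh', PySem.Chars.lower]
            · by_cases hh : pvHasTok p = true
              · simp [pvF, ht, pvHasTok_cons, hwf, hh, pvRstrip_cons_hasTok hh,
                  pvLower_cons]
              · have hh' : pvHasTok p = false := by simpa using hh
                simp [pvF, ht, pvHasTok_cons, hwf, hh',
                  pvRstrip_cons_allws hh' hwf, PySem.Chars.lower]
          simp [key, List.modifyHead]

lemma pvScanPattern (l : List Char) (out : List String) :
    ((l ++ [',']).foldl pvScanStep (out, [], [])).1 = out ++ pvProcess (pvPieces ',' l) := by
  rw [pvH l out [] [] (fun _ => rfl)]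
  cases h : pvPieces ',' l with
  | nil => exact absurd h (pvPieces_ne_nil ',' l)
  | cons p t => simp [pvF, pvProcess]

lemma pvInner (ps : List (List Char)) (acc : List String) :
    ps.foldl (fun acc part =>
        let clean := PySem.Chars.lower (PySem.Chars.strip part)
        if clean ≠ [] then acc ++ [String.ofList clean] else acc) acc
      = acc ++ pvProcess ps := by
  induction ps generalizing acc with
  | nil => simp [pvProcess]
  | cons p t ih =>
    simp only [List.foldl_cons, ih]
    by_cases h : pvClean p = []
    · simp [pvProcess, pvClean, pvMaybe] at h ⊢
      simp [h]
    · simp only [pvClean] at h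
      simp [pvProcess, pvClean, pvMaybe, h]

lemma pvProcess_append (a b : List (List Char)) :
    pvProcess (a ++ b) = pvProcess a ++ pvProcess b := by
  simp [pvProcess]

lemma pvOuter (xs : List String) (acc : List String) :
    xs.foldl (fun normalized pattern =>
      (PySem.Chars.splitOn pattern.toList [',']).foldl (fun acc part =>
        let clean := PySem.Chars.lower (PySem.Chars.strip part)
        if clean ≠ [] then acc ++ [String.ofList clean] else acc) normalized) acc
      = acc ++ pvProcess (xs.flatMap (fun s => pvPieces ',' s.toList)) := by
  induction xs generalizing acc with
  | nil => simp [pvProcess]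
  | cons x rest ih =>
    rw [List.foldl_cons, pvSplitOn_single, pvInner, ih]
    simp [pvProcess_append]

lemma pvBOuter (xs : List String) (acc : List String) :
    xs.foldl (fun out pattern =>
      ((pattern.toList ++ [',']).foldl pvScanStep (out, [], [])).1) acc
      = acc ++ pvProcess (xs.flatMap (fun s => pvPieces ',' s.toList)) := by
  induction xs generalizing acc with
  | nil => simp [pvProcess]
  | cons x rest ih =>
    rw [List.foldl_cons, pvScanPattern, ih]
    simp [pvProcess_append]

-- ===== VERDICT (by name: the statement is the Claim_ definition above) =====
theorem normalize_pattern_list_py_spec : Claim_equal_normalize_pattern_list_py := by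
  intro xs _
  unfold Spec_normalize_pattern_list_py normalize_pattern_list_py normalize_pattern_list_py_alt
  rw [pvOuter, pvBOuter]
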